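-- pv_equiv track=rewrite | github.com/pypi-data/pypi-mirror-33 | packages/smartsched/smartsched-0.1.14-py3-none-any.whl/smartsched/monitoring_api/influx.py | get_shrinked_list
-- ===== SOURCE A (Python) =====
-- def get_shrinked_list(listOfDict, primary_key):
--     result = {}
--     for elem in listOfDict:
--         if elem[primary_key] not in result:
--             result[elem[primary_key]] = elem
--         else:
--             result[elem[primary_key]].update(elem)
--     result = [dict(result[key].items()) for key in result]
--     result.sort(key=lambda x: x[primary_key])
--     return result
-- ===== SOURCE B (Python) =====
-- def get_shrinked_list(listOfDict, primary_key):
--     ordered = sorted(listOfDict, key=lambda x: x[primary_key])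
--     out = []
--     acc = None
--     for e in ordered:
--         if acc is not None and e[primary_key] == acc[primary_key]:
--             acc.update(e)
--         else:
--             if acc is not None:
--                 out.append(acc)
--             acc = dict(e.items())
--     if acc is not None:
--         out.append(acc)
--     return out
-- ===== Notes on version B (the rewrite author's own statement) =====
-- stated objective: alternative
-- what changed: Replaces A's hash-dict accumulation (membership test + keyed in-place merge, then a final sort of the merged dicts) by a stable sort of the input first, followed by one linear pass that merges consecutive runs sharing the primary key.
import Mathlib
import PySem

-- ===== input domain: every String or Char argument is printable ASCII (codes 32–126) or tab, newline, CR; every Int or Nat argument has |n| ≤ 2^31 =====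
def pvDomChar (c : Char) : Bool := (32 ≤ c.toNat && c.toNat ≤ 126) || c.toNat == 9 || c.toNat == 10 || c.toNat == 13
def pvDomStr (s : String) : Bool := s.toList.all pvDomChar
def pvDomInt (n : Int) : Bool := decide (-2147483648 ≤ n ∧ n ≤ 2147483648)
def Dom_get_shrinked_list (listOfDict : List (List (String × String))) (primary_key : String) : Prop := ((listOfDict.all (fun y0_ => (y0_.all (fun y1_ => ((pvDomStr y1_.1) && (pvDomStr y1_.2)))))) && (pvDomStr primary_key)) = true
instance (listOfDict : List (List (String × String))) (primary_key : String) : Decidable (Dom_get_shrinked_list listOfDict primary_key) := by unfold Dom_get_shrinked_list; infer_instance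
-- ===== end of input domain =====

-- B replaces A's hash-dict accumulation + final sort by sort-first-then-merge-adjacent-runs (alternative
-- decomposition, similar cost). Return-value equivalence only: Python A mutates the first-occurrence dicts
-- of its input in place, B leaves the input untouched.

-- ===== PORT A =====
-- d.update(e.items()) — Python's dict.update, shared by both ports' loop bodies
def pvUpd (a e : PySem.Dict String String) : PySem.Dict String String := a.update e.items

-- body of A's 'for elem in listOfDict' loop
def pvStepA (pk : String) (res : PySem.Dict String (PySem.Dict String String))
    (elem : PySem.Dict String String) : PySem.Dict String (PySem.Dict String String) :=
  match res.get? (elem.getD pk "") with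
  | none => res.insert (elem.getD pk "") elem
  | some d => res.insert (elem.getD pk "") (pvUpd d elem)

def get_shrinked_list (listOfDict : List (List (String × String))) (primary_key : String) : List (List (String × String)) :=
  let result := (listOfDict.map PySem.Dict.ofList).foldl (pvStepA primary_key) PySem.Dict.empty
  let lst := result.items.map (fun kv => kv.2)
  (PySem.List.sorted lst (fun x => x.getD primary_key "")).map PySem.Dict.items

-- ===== PORT B =====
-- body of B's 'for e in ordered' loop; state = (out, acc)
def pvStepB (pk : String) (st : List (PySem.Dict String String) × Option (PySem.Dict String String))
    (e : PySem.Dict String String) : List (PySem.Dict String String) × Option (PySem.Dict String String) :=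
  match st.2 with
  | some acc =>
      if e.getD pk "" == acc.getD pk "" then (st.1, some (pvUpd acc e))
      else (st.1 ++ [acc], some e)
  | none => (st.1, some e)

def get_shrinked_list_alt (listOfDict : List (List (String × String))) (primary_key : String) : List (List (String × String)) :=
  let ordered := PySem.List.sorted (listOfDict.map PySem.Dict.ofList) (fun x => x.getD primary_key "")
  let st := ordered.foldl (pvStepB primary_key) ([], none)
  (match st.2 with
   | some acc => st.1 ++ [acc]
   | none => st.1).map PySem.Dict.items

-- ===== PRECONDITION & SPEC =====
-- Pre_ excludes exactly the inputs where Python A raises KeyError (an element dict lacks the primary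
-- key) and, as the association-list dict convention leaves duplicate-key element lists meaningless,
-- those inputs whose element lists carry a duplicate key are read through Python's dict(...) collapse
-- (PySem.Dict.ofList) exactly as Python receives them, so no extra exclusion is needed for them.
def Pre_get_shrinked_list (listOfDict : List (List (String × String))) (primary_key : String) : Prop :=
  ∀ e ∈ listOfDict, primary_key ∈ e.map Prod.fst
instance (listOfDict : List (List (String × String))) (primary_key : String) : Decidable (Pre_get_shrinked_list listOfDict primary_key) := by unfold Pre_get_shrinked_list; infer_instance

def pvWitness_get_shrinked_list : (List (List (String × String))) × String :=
  ([[("k", "x"), ("a", "1")], [("k", "x"), ("b", "2")], [("k", "w")]], "k")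

def Spec_get_shrinked_list (listOfDict : List (List (String × String))) (primary_key : String) (out : List (List (String × String))) : Prop := out = get_shrinked_list_alt listOfDict primary_key
instance (listOfDict : List (List (String × String))) (primary_key : String) (out : List (List (String × String))) : Decidable (Spec_get_shrinked_list listOfDict primary_key out) := by unfold Spec_get_shrinked_list; infer_instance

-- ===== CLAIM (what is proved, stated in full; the proofs are below) =====
def Claim_equal_get_shrinked_list : Prop := ∀ (listOfDict : List (List (String × String))) (primary_key : String), Dom_get_shrinked_list listOfDict primary_key → Pre_get_shrinked_list listOfDict primary_key → Spec_get_shrinked_list listOfDict primary_key (get_shrinked_list listOfDict primary_key)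

-- ===== LEMMAS AND PROOFS =====


theorem pvFk_mem_foldl (l : List String) (acc : List String) (x : String) :
    x ∈ l.foldl (fun acc x => if x ∈ acc then acc else acc ++ [x]) acc ↔ x ∈ acc ∨ x ∈ l := by
  induction l generalizing acc with
  | nil => simp
  | cons y l ih =>
    simp only [List.foldl_cons, ih]
    by_cases hy : y ∈ acc
    · simp [hy]
      constructor
      · rintro (h | h) <;> tauto
      · rintro (h | h | h)
        · tauto
        · subst h; tauto
        · tauto
    · simp [hy, List.mem_append]
      constructor
      · rintro ((h | h) | h) <;> simp_all
      · rintro (h | h | h) <;> simp_all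

def pvFk (l : List String) : List String :=
  l.foldl (fun acc x => if x ∈ acc then acc else acc ++ [x]) []

theorem pvFk_mem (l : List String) (x : String) : x ∈ pvFk l ↔ x ∈ l := by
  simp [pvFk, pvFk_mem_foldl]

theorem pvFk_concat (l : List String) (x : String) :
    pvFk (l ++ [x]) = if x ∈ l then pvFk l else pvFk l ++ [x] := by
  have : pvFk (l ++ [x]) = if x ∈ pvFk l then pvFk l else pvFk l ++ [x] := by
    simp [pvFk, List.foldl_append]
  rw [this]
  by_cases hx : x ∈ l
  · simp [hx, (pvFk_mem l x).mpr hx]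
  · have : x ∉ pvFk l := fun h => hx ((pvFk_mem l x).mp h)
    simp [hx, this]

theorem pvFk_nodup_foldl (l : List String) (acc : List String) (h : acc.Nodup) :
    (l.foldl (fun acc x => if x ∈ acc then acc else acc ++ [x]) acc).Nodup := by
  induction l generalizing acc with
  | nil => simpa
  | cons y l ih =>
    simp only [List.foldl_cons]
    by_cases hy : y ∈ acc
    · simp [hy]; exact ih _ h
    · simp [hy]
      refine ih _ ?_
      simp only [List.nodup_append, List.nodup_cons, List.nodup_nil, and_true]
      refine ⟨h, by simp, ?_⟩
      intro a ha b hb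
      simp only [List.mem_singleton] at hb
      subst hb
      exact fun hab => hy (hab ▸ ha)

theorem pvFk_nodup (l : List String) : (pvFk l).Nodup := pvFk_nodup_foldl l [] (by simp)

theorem pvFk_sublist (l : List String) : List.Sublist (pvFk l) l := by
  induction l using List.reverseRecOn with
  | nil => simp [pvFk]
  | append_singleton l x ih =>
    rw [pvFk_concat]
    by_cases hx : x ∈ l
    · simp [hx]
      exact ih.trans (List.sublist_append_left l [x])
    · simp [hx]
      exact ih



def pvMerge (l : List (PySem.Dict String String)) : PySem.Dict String String :=
  match l with
  | [] => PySem.Dict.empty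
  | e :: r => r.foldl pvUpd e

theorem pvMerge_concat (l : List (PySem.Dict String String)) (e : PySem.Dict String String) (h : l ≠ []) :
    pvMerge (l ++ [e]) = pvUpd (pvMerge l) e := by
  obtain ⟨x, r, rfl⟩ := List.exists_cons_of_ne_nil h
  simp [pvMerge, List.foldl_append]

theorem pv_get?_update (ps : List (String × String)) (hn : (ps.map Prod.fst).Nodup)
    (d : PySem.Dict String String) (x : String) :
    (d.update ps).get? x = ((PySem.Dict.mk ps).get? x).or (d.get? x) := by
  induction ps generalizing d with
  | nil =>
    have : (PySem.Dict.mk ([] : List (String × String))) = PySem.Dict.empty := rfl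
    simp [PySem.Dict.update, this, PySem.Dict.get?_empty, Option.or]
  | cons kv rest ih =>
    simp only [List.map_cons, List.nodup_cons] at hn
    have hrec := ih hn.2 (d.insert kv.1 kv.2)
    have hupd : (d.update (kv :: rest)) = ((d.insert kv.1 kv.2).update rest) := by
      simp [PySem.Dict.update]
    rw [hupd, hrec, PySem.Dict.get?_mk_cons]
    by_cases hx : kv.1 = x
    · subst hx
      have hnone : (PySem.Dict.mk rest).get? kv.1 = none := by
        rw [PySem.Dict.get?_eq_none_iff_not_mem_keys]
        simpa [PySem.Dict.keys_mk] using hn.1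
      simp [hnone, PySem.Dict.get?_insert_self, Option.or]
    · have hne : x ≠ kv.1 := fun h => hx h.symm
      have : (d.insert kv.1 kv.2).get? x = d.get? x := by
        rw [PySem.Dict.get?_insert]; simp [hne]
      simp [hx, this, beq_iff_eq]

theorem pv_get?_pvUpd (a e : PySem.Dict String String) (hn : e.keys.Nodup) (x : String) :
    (pvUpd a e).get? x = (e.get? x).or (a.get? x) := by
  have h1 : PySem.Dict.mk e.items = e := rfl
  have := pv_get?_update e.items (by simpa [PySem.Dict.keys] using hn) a x
  simpa [pvUpd, h1] using this

theorem pv_key_merge (pk k : String) (l : List (PySem.Dict String String)) (hne : l ≠ [])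
    (h : ∀ e ∈ l, e.get? pk = some k ∧ e.keys.Nodup) :
    (pvMerge l).get? pk = some k := by
  obtain ⟨x, r, rfl⟩ := List.exists_cons_of_ne_nil hne
  have hx := h x (by simp)
  simp only [pvMerge]
  have inv : ∀ (r' : List (PySem.Dict String String)) (a : PySem.Dict String String),
      (∀ e ∈ r', e.get? pk = some k ∧ e.keys.Nodup) → a.get? pk = some k →
      (r'.foldl pvUpd a).get? pk = some k := by
    intro r' ; induction r' with
    | nil => intro a _ ha; simpa
    | cons y ys ih =>
      intro a hall ha
      simp only [List.foldl_cons]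
      refine ih _ (fun e he => hall e (by simp [he])) ?_
      have hy := hall y (by simp)
      rw [pv_get?_pvUpd a y hy.2, hy.1]
      rfl
  exact inv r x (fun e he => h e (by simp [he])) hx.1

def pvK (pk : String) (d : PySem.Dict String String) : String := d.getD pk ""


theorem pvA_items (pk : String) (ds : List (PySem.Dict String String)) :
    (ds.foldl (pvStepA pk) PySem.Dict.empty).items
      = (pvFk (ds.map (pvK pk))).map
          (fun k => (k, pvMerge (ds.filter (fun d => pvK pk d == k)))) := by
  induction ds using List.reverseRecOn with
  | nil => simp [pvFk, PySem.Dict.empty]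
  | append_singleton ds e ih =>
    rw [List.foldl_append]
    set R := ds.foldl (pvStepA pk) PySem.Dict.empty with hR
    set k := pvK pk e with hk
    set F := pvFk (ds.map (pvK pk)) with hF
    have hkeys : R.keys = F := by
      show R.items.map Prod.fst = F
      rw [ih, List.map_map]
      have : (Prod.fst ∘ fun k => (k, pvMerge (List.filter (fun d => pvK pk d == k) ds))) = id := rfl
      rw [this, List.map_id]
    have hnodup : R.keys.Nodup := by rw [hkeys]; exact pvFk_nodup _
    have hFk : pvFk ((ds ++ [e]).map (pvK pk)) = if k ∈ ds.map (pvK pk) then F else F ++ [k] := by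
      rw [List.map_append, List.map_singleton, pvFk_concat]
    have hfilter : ∀ k', (ds ++ [e]).filter (fun d => pvK pk d == k')
        = ds.filter (fun d => pvK pk d == k') ++ if k == k' then [e] else [] := by
      intro k'
      rw [List.filter_append]
      congr 1
      rw [List.filter_singleton, ← hk]
      cases h : (k == k') <;> simp

    rw [show List.foldl (pvStepA pk) R [e] = pvStepA pk R e from rfl]
    by_cases hmem : k ∈ ds.map (pvK pk)
    · -- key already present
      have hkF : k ∈ F := (pvFk_mem _ _).mpr hmem
      have hfne : ds.filter (fun d => pvK pk d == k) ≠ [] := by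
        obtain ⟨d, hd, hdk⟩ := List.mem_map.mp hmem
        intro hnil
        have : d ∈ ds.filter (fun d => pvK pk d == k) := by
          rw [List.mem_filter]; exact ⟨hd, by simp [hdk]⟩
        simp [hnil] at this
      have hget : R.get? k = some (pvMerge (ds.filter (fun d => pvK pk d == k))) := by
        apply PySem.Dict.get?_of_mem_items _ _ hnodup
        rw [ih]
        exact List.mem_map.mpr ⟨k, hkF, rfl⟩
      have hcont : R.contains k = true := by
        rw [PySem.Dict.contains_eq_decide_mem_keys, hkeys]
        simpa using hkF
      have hstep : pvStepA pk R e = R.insert k (pvUpd (pvMerge (ds.filter (fun d => pvK pk d == k))) e) := by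
        simp only [pvStepA]
        have : e.getD pk "" = k := rfl
        rw [this, hget]
      rw [hstep, PySem.Dict.items_insert_of_contains _ _ hcont, ih, hFk, if_pos hmem]
      rw [List.map_map]
      apply List.map_congr_left
      intro k' _
      by_cases hkk : k' = k
      · subst hkk
        simp only [Function.comp_apply, beq_self_eq_true, if_pos]
        rw [hfilter, if_pos (by simp), pvMerge_concat _ _ hfne]
      · have h1 : (k' == k) = false := by simp [hkk]
        have h2 : (k == k') = false := by simp only [beq_eq_false_iff_ne]; exact Ne.symm hkk
        simp only [Function.comp_apply, h1]
        rw [hfilter k', h2]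
        simp
    · -- fresh key
      have hkF : k ∉ F := fun h => hmem ((pvFk_mem _ _).mp h)
      have hget : R.get? k = none := by
        rw [PySem.Dict.get?_eq_none_iff_not_mem_keys, hkeys]
        exact hkF
      have hcont : R.contains k = false := by
        rw [PySem.Dict.contains_eq_decide_mem_keys, hkeys]
        simpa using hkF
      have hstep : pvStepA pk R e = R.insert k e := by
        simp only [pvStepA]
        have : e.getD pk "" = k := rfl
        rw [this, hget]
      have hfnil : ds.filter (fun d => pvK pk d == k) = [] := by
        rw [List.filter_eq_nil_iff]
        intro d hd
        simp only [beq_iff_eq]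
        exact fun h => hmem (List.mem_map.mpr ⟨d, hd, h⟩)
      rw [hstep, PySem.Dict.items_insert_of_not_contains _ _ hcont, ih, hFk, if_neg hmem]
      rw [List.map_append]
      congr 1
      · apply List.map_congr_left
        intro k' hk'
        have h2 : (k == k') = false := by
          simp only [beq_eq_false_iff_ne]
          intro h
          exact hkF (h ▸ hk')
        rw [hfilter k', h2]
        simp
      · rw [List.map_singleton, hfilter, if_pos (by simp), hfnil]
        simp [pvMerge]


theorem pv_filter_insertBy {α : Type} (key : α → String) (x : α)
    (ys : List α) (k : String)
    (hys : ys.Pairwise (fun a b => key a ≤ key b)) :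
    (PySem.List.insertBy (fun a b => decide (key a < key b)) x ys).filter (fun y => key y == k)
      = ys.filter (fun y => key y == k) ++ if key x == k then [x] else [] := by
  induction ys with
  | nil =>
    simp only [PySem.List.insertBy, List.filter_nil, List.nil_append]
    rw [List.filter_singleton]
    cases h : (key x == k) <;> simp
  | cons y ys ih =>
    rw [List.pairwise_cons] at hys
    simp only [PySem.List.insertBy]
    by_cases hb : key x < key y
    · simp only [hb, decide_true, if_pos]
      by_cases hxk : (key x == k) = true
      · -- every element of y :: ys has key > k, so its filter is empty
        have hxkeq : key x = k := by simpa using hxk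
        have hempty : (y :: ys).filter (fun y => key y == k) = [] := by
          rw [List.filter_eq_nil_iff]
          intro z hz
          have hyz : key y ≤ key z := by
            rcases hz with _ | hz
            · exact le_refl _
            · exact hys.1 z (by assumption)
          simp only [beq_iff_eq]
          intro hzk
          rw [hzk, ← hxkeq] at hyz
          exact absurd (lt_of_lt_of_le hb hyz) (lt_irrefl _)
        rw [List.filter_cons_of_pos (by simpa using hxk), hempty, hxk]
        simp
      · rw [List.filter_cons_of_neg (by simpa using hxk)]
        simp [hxk]
    · simp only [hb, decide_false, Bool.false_eq_true, if_false]
      by_cases hyk : (key y == k) = true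
      · rw [List.filter_cons_of_pos (by simpa using hyk), List.filter_cons_of_pos (by simpa using hyk)]
        rw [ih hys.2]
        simp
      · rw [List.filter_cons_of_neg (by simpa using hyk), List.filter_cons_of_neg (by simpa using hyk)]
        exact ih hys.2

theorem pv_sorted_filter {α : Type} (key : α → String)
    (xs : List α) (k : String) :
    (PySem.List.sorted xs key).filter (fun y => key y == k) = xs.filter (fun y => key y == k) := by
  induction xs using List.reverseRecOn with
  | nil => simp [PySem.List.sorted_eq_foldl_insertBy]
  | append_singleton xs x ih =>
    have hsorted : PySem.List.sorted (xs ++ [x]) key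
        = PySem.List.insertBy (fun a b => decide (key a < key b)) x (PySem.List.sorted xs key) := by
      rw [PySem.List.sorted_eq_foldl_insertBy, List.foldl_append, ← PySem.List.sorted_eq_foldl_insertBy]
      rfl
    rw [hsorted, pv_filter_insertBy key x _ k (PySem.List.sorted_pairwise xs key)]
    rw [ih, List.filter_append, List.filter_singleton]
    cases h : (key x == k) <;> simp

theorem pvFk_eq_nil_iff (l : List String) : pvFk l = [] ↔ l = [] := by
  constructor
  · intro h
    cases l with
    | nil => rfl
    | cons x xs =>
      exfalso
      have : x ∈ pvFk (x :: xs) := (pvFk_mem _ _).mpr (by simp)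
      simp [h] at this
  · rintro rfl; rfl

theorem pv_group_key (pk k : String) (os : List (PySem.Dict String String))
    (ho : ∀ e ∈ os, (∃ v, e.get? pk = some v) ∧ e.keys.Nodup)
    (hmem : k ∈ os.map (pvK pk)) :
    (pvMerge (os.filter (fun d => pvK pk d == k))).get? pk = some k := by
  have hne : os.filter (fun d => pvK pk d == k) ≠ [] := by
    obtain ⟨d, hd, hdk⟩ := List.mem_map.mp hmem
    intro hnil
    have : d ∈ os.filter (fun d => pvK pk d == k) := by
      rw [List.mem_filter]; exact ⟨hd, by simp [hdk]⟩
    simp [hnil] at this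
  apply pv_key_merge pk k _ hne
  intro e he
  rw [List.mem_filter] at he
  obtain ⟨⟨v, hv⟩, hnod⟩ := ho e he.1
  have hek : pvK pk e = k := by simpa using he.2
  have : pvK pk e = v := by
    simp only [pvK]
    rw [PySem.Dict.getD_eq_get?_getD, hv]
    rfl
  rw [this] at hek
  subst hek
  exact ⟨hv, hnod⟩

theorem pvB_fold (pk : String) (os : List (PySem.Dict String String))
    (hs : os.Pairwise (fun a b => pvK pk a ≤ pvK pk b))
    (ho : ∀ e ∈ os, (∃ v, e.get? pk = some v) ∧ e.keys.Nodup) :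
    os.foldl (pvStepB pk) ([], none)
      = ((pvFk (os.map (pvK pk))).dropLast.map (fun k => pvMerge (os.filter (fun d => pvK pk d == k))),
         ((pvFk (os.map (pvK pk))).getLast?).map (fun k => pvMerge (os.filter (fun d => pvK pk d == k)))) := by
  induction os using List.reverseRecOn with
  | nil => simp [pvFk]
  | append_singleton os e ih =>
    have hs' : os.Pairwise (fun a b => pvK pk a ≤ pvK pk b) :=
      hs.sublist (List.sublist_append_left os [e])
    have ho' : ∀ e' ∈ os, (∃ v, e'.get? pk = some v) ∧ e'.keys.Nodup :=
      fun e' he' => ho e' (by simp [he'])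
    have hle : ∀ d ∈ os, pvK pk d ≤ pvK pk e := by
      have := (List.pairwise_append.mp hs).2.2
      intro d hd
      exact this d hd e (by simp)
    rw [List.foldl_append, ih hs' ho']
    set F := pvFk (os.map (pvK pk)) with hF
    set k := pvK pk e with hk
    have hFk : pvFk ((os ++ [e]).map (pvK pk)) = if k ∈ os.map (pvK pk) then F else F ++ [k] := by
      rw [List.map_append, List.map_singleton, pvFk_concat]
    have hfilter : ∀ k', (os ++ [e]).filter (fun d => pvK pk d == k')
        = os.filter (fun d => pvK pk d == k') ++ if (k == k') = true then [e] else [] := by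
      intro k'
      rw [List.filter_append]
      congr 1
      rw [List.filter_singleton, ← hk]
      cases h : (k == k') <;> simp
    have hFpw : F.Pairwise (· ≤ ·) := by
      have h1 : (os.map (pvK pk)).Pairwise (· ≤ ·) := List.pairwise_map.mpr hs'
      exact h1.sublist (pvFk_sublist _)
    by_cases hnil : os = []
    · subst hnil
      show pvStepB pk ([], none) e = _
      simp only [pvStepB]
      rw [hFk]
      simp only [List.map_nil, List.not_mem_nil, if_false]
      have : (F ++ [k]) = [k] := by rw [hF]; simp [pvFk]
      rw [this]
      simp only [List.dropLast_singleton, List.map_nil, List.getLast?_singleton, Option.map_some]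
      rw [hfilter k]
      simp [pvMerge]
    · have hFne : F ≠ [] := by
        rw [hF]
        intro h
        rw [pvFk_eq_nil_iff] at h
        exact hnil (List.map_eq_nil_iff.mp h)
      set kl := F.getLast hFne with hkl
      have hlast? : F.getLast? = some kl := List.getLast?_eq_some_getLast hFne
      have hklF : kl ∈ F := List.getLast_mem hFne
      have hklmem : kl ∈ os.map (pvK pk) := (pvFk_mem _ _).mp hklF
      have hacckey : pvK pk (pvMerge (os.filter (fun d => pvK pk d == kl))) = kl := by
        have h1 := pv_group_key pk kl os ho' hklmem
        show (pvMerge (os.filter (fun d => pvK pk d == kl))).getD pk "" = kl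
        rw [PySem.Dict.getD_eq_get?_getD, h1]
        rfl
      have hdrop : F = F.dropLast ++ [kl] := (List.dropLast_append_getLast hFne).symm
      have hdropne : ∀ k' ∈ F.dropLast, k' ≠ kl := by
        have hnd : F.Nodup := by rw [hF]; exact pvFk_nodup _
        rw [hdrop] at hnd
        intro k' hk' h
        rcases List.disjoint_of_nodup_append hnd hk' (by simp [h])
      rw [hlast?]
      simp only [Option.map_some]
      show pvStepB pk (_, some _) e = _
      simp only [pvStepB]
      by_cases heq : k = kl
      · -- same run: merge into accumulator
        have hcond : (e.getD pk "" == (pvMerge (os.filter (fun d => pvK pk d == kl))).getD pk "") = true := by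
          show (k == pvK pk _) = true
          rw [hacckey]
          simp [heq]
        rw [if_pos hcond]
        have hmemk : k ∈ os.map (pvK pk) := by rw [heq]; exact hklmem
        rw [hFk, if_pos hmemk, hlast?]
        simp only [Option.map_some]
        rw [Prod.mk.injEq]
        have hfne : os.filter (fun d => pvK pk d == kl) ≠ [] := by
          obtain ⟨d, hd, hdk⟩ := List.mem_map.mp hklmem
          intro hnl
          have : d ∈ os.filter (fun d => pvK pk d == kl) := by
            rw [List.mem_filter]; exact ⟨hd, by simp [hdk]⟩
          simp [hnl] at this
        refine ⟨List.map_congr_left ?_, ?_⟩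
        · intro k' hk'
          have hkk : (k == k') = false := by
            simp only [beq_eq_false_iff_ne]
            intro h
            exact hdropne k' hk' (by rw [← h, heq])
          rw [hfilter k', hkk]
          simp
        · congr 1
          rw [hfilter kl, heq]
          simp only [beq_self_eq_true, if_pos]
          rw [pvMerge_concat _ _ hfne]
      · -- new key starts a new run
        have hcond : (e.getD pk "" == (pvMerge (os.filter (fun d => pvK pk d == kl))).getD pk "") = false := by
          show (k == pvK pk _) = false
          rw [hacckey]
          simp [heq]
        rw [if_neg (by rw [hcond]; exact Bool.false_ne_true)]
        have hnotmem : k ∉ os.map (pvK pk) := by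
          intro hmemk
          have hkF : k ∈ F := (pvFk_mem _ _).mpr hmemk
          have hkle : k ≤ kl := by
            rw [hdrop] at hFpw hkF
            rcases List.mem_append.mp hkF with h | h
            · exact ((List.pairwise_append.mp hFpw).2.2 k h kl (by simp))
            · exact absurd (by simpa using h) heq
          have hlek : kl ≤ k := by
            obtain ⟨d, hd, hdk⟩ := List.mem_map.mp hklmem
            rw [← hdk]
            exact hle d hd
          exact heq (le_antisymm hkle hlek)
        rw [hFk, if_neg hnotmem]
        rw [List.dropLast_concat, List.getLast?_concat]
        simp only [Option.map_some]
        rw [Prod.mk.injEq]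
        have hfnil : os.filter (fun d => pvK pk d == k) = [] := by
          rw [List.filter_eq_nil_iff]
          intro d hd
          simp only [beq_iff_eq]
          exact fun h => hnotmem (List.mem_map.mpr ⟨d, hd, h⟩)
        refine ⟨?_, ?_⟩
        · have hmapeq : F.map (fun k' => pvMerge ((os ++ [e]).filter (fun d => pvK pk d == k')))
              = F.map (fun k' => pvMerge (os.filter (fun d => pvK pk d == k'))) := by
            apply List.map_congr_left
            intro k' hk'
            have hkk : (k == k') = false := by
              simp only [beq_eq_false_iff_ne]
              intro h
              exact hnotmem ((pvFk_mem _ _).mp (h ▸ hk'))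
            rw [hfilter k', hkk]
            simp
          rw [hmapeq]
          conv_rhs => rw [hdrop]
          rw [List.map_append]
          rfl
        · congr 1
          rw [hfilter k]
          simp only [beq_self_eq_true, if_pos, hfnil]
          simp [pvMerge]

theorem pv_ho (L : List (List (String × String))) (pk : String) (hpre : Pre_get_shrinked_list L pk) :
    ∀ e ∈ L.map PySem.Dict.ofList, (∃ v, e.get? pk = some v) ∧ e.keys.Nodup := by
  intro e he
  obtain ⟨ps, hps, rfl⟩ := List.mem_map.mp he
  refine ⟨?_, PySem.Dict.nodup_keys_ofList ps⟩
  have hkmem : pk ∈ (PySem.Dict.ofList ps).keys := by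
    have h1 : (PySem.Dict.ofList ps).keys = PySem.Set.update (PySem.Dict.empty : PySem.Dict String String).keys (ps.map Prod.fst) := by
      show ((PySem.Dict.empty.update ps)).keys = _
      rw [PySem.Dict.update]
      exact PySem.Dict.keys_foldl_insert_key ps Prod.fst _ _
    rw [h1]
    have h2 : PySem.Set.update (PySem.Dict.empty : PySem.Dict String String).keys (ps.map Prod.fst) = PySem.Set.ofList (ps.map Prod.fst) := by
      rfl
    rw [h2, PySem.Set.mem_ofList]
    exact hpre ps hps
  cases hv : (PySem.Dict.ofList ps).get? pk with
  | none => exact absurd ((PySem.Dict.get?_eq_none_iff_not_mem_keys _ _).mp hv) (by simpa using hkmem)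
  | some v => exact ⟨v, rfl⟩

theorem pv_gkey (pk x : String) (os : List (PySem.Dict String String))
    (ho : ∀ e ∈ os, (∃ v, e.get? pk = some v) ∧ e.keys.Nodup)
    (hmem : x ∈ os.map (pvK pk)) :
    pvK pk (pvMerge (os.filter (fun d => pvK pk d == x))) = x := by
  have h1 := pv_group_key pk x os ho hmem
  show (pvMerge (os.filter (fun d => pvK pk d == x))).getD pk "" = x
  rw [PySem.Dict.getD_eq_get?_getD, h1]
  rfl

theorem pv_main (L : List (List (String × String))) (pk : String)
    (hpre : Pre_get_shrinked_list L pk) :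
    get_shrinked_list L pk = get_shrinked_list_alt L pk := by
  set ds := L.map PySem.Dict.ofList with hds
  have hkeyfn : (fun x : PySem.Dict String String => x.getD pk "") = pvK pk := rfl
  have ho : ∀ e ∈ ds, (∃ v, e.get? pk = some v) ∧ e.keys.Nodup := pv_ho L pk hpre
  set F := pvFk (ds.map (pvK pk)) with hF
  set g := fun k => pvMerge (ds.filter (fun d => pvK pk d == k)) with hg
  set S := PySem.List.sorted F (fun x => x) with hS
  have hFnodup : F.Nodup := pvFk_nodup _
  have hSperm : S.Perm F := PySem.List.sorted_perm F _ false
  have hSnodup : S.Nodup := hSperm.nodup_iff.mpr hFnodup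
  have hSlt : S.Pairwise (· < ·) := by
    have hle : S.Pairwise (· ≤ ·) := PySem.List.sorted_pairwise F (fun x => x)
    have hne : S.Pairwise (· ≠ ·) := hSnodup
    exact (hle.and hne).imp (fun h => lt_of_le_of_ne h.1 h.2)
  have hSmem : ∀ x ∈ S, x ∈ ds.map (pvK pk) := by
    intro x hx
    exact (pvFk_mem _ _).mp (hSperm.mem_iff.mp hx)
  -- A'S SIDE
  have hA : get_shrinked_list L pk = (S.map g).map PySem.Dict.items := by
    show (PySem.List.sorted (((ds.foldl (pvStepA pk) PySem.Dict.empty).items).map (fun kv => kv.2))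
            (fun x => x.getD pk "")).map PySem.Dict.items = _
    rw [pvA_items pk ds, List.map_map, hkeyfn]
    have hvals : (List.map ((fun kv : String × PySem.Dict String String => kv.2) ∘
        fun k => (k, pvMerge (List.filter (fun d => pvK pk d == k) ds))) F) = F.map g := rfl
    rw [hvals]
    congr 1
    apply PySem.List.sorted_eq_of_perm_of_pairwise_lt
    · exact hSperm.map g
    · rw [List.pairwise_map]
      refine hSlt.imp_of_mem ?_
      intro a b ha hb hab
      rw [hg]
      have hga : pvK pk (pvMerge (ds.filter (fun d => pvK pk d == a))) = a :=
        pv_gkey pk a ds ho (hSmem a ha)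
      have hgb : pvK pk (pvMerge (ds.filter (fun d => pvK pk d == b))) = b :=
        pv_gkey pk b ds ho (hSmem b hb)
      simpa [hga, hgb] using hab
  -- B'S SIDE
  set ordered := PySem.List.sorted ds (pvK pk) with hord
  have hordperm : ordered.Perm ds := PySem.List.sorted_perm ds _ false
  have hordpw : ordered.Pairwise (fun a b => pvK pk a ≤ pvK pk b) := PySem.List.sorted_pairwise ds (pvK pk)
  have hordho : ∀ e ∈ ordered, (∃ v, e.get? pk = some v) ∧ e.keys.Nodup :=
    fun e he => ho e (hordperm.mem_iff.mp he)
  set F2 := pvFk (ordered.map (pvK pk)) with hF2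
  set g2 := fun k => pvMerge (ordered.filter (fun d => pvK pk d == k)) with hg2
  have hB : get_shrinked_list_alt L pk = (F2.map g2).map PySem.Dict.items := by
    show (match (ordered.foldl (pvStepB pk) ([], none)).2 with
          | some acc => (ordered.foldl (pvStepB pk) ([], none)).1 ++ [acc]
          | none => (ordered.foldl (pvStepB pk) ([], none)).1).map PySem.Dict.items = _
    rw [pvB_fold pk ordered hordpw hordho, ← hF2, ← hg2]
    by_cases hnil : F2 = []
    · rw [hnil]
      simp
    · rw [List.getLast?_eq_some_getLast hnil]
      simp only [Option.map_some]
      congr 1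
      conv_rhs => rw [(List.dropLast_append_getLast hnil).symm]
      rw [List.map_append]
      rfl
  -- the two key lists coincide
  have hF2S : F2 = S := by
    apply PySem.List.eq_of_perm_of_pairwise_le_of_injective (fun x : String => x) Function.injective_id
    · rw [List.perm_ext_iff_of_nodup (pvFk_nodup _) hSnodup]
      intro a
      rw [pvFk_mem, hSperm.mem_iff, pvFk_mem]
      exact ((hordperm.map (pvK pk)).mem_iff)
    · exact ((List.pairwise_map.mpr hordpw).sublist (pvFk_sublist _))
    · exact PySem.List.sorted_pairwise F (fun x => x)
  -- the two group merges coincide (stability of the sort)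
  have hgg : ∀ x, g2 x = g x := by
    intro x
    show pvMerge ((PySem.List.sorted ds (pvK pk)).filter (fun d => pvK pk d == x))
        = pvMerge (ds.filter (fun d => pvK pk d == x))
    exact congrArg pvMerge (pv_sorted_filter (pvK pk) ds x)
  rw [hA, hB, hF2S]
  have hmaps : S.map g2 = S.map g := List.map_congr_left (fun x _ => hgg x)
  rw [hmaps]

-- ===== VERDICT (by name: the statement is the Claim_ definition above) =====
theorem get_shrinked_list_spec : Claim_equal_get_shrinked_list := by
  intro listOfDict primary_key _ hpre
  show get_shrinked_list listOfDict primary_key = get_shrinked_list_alt listOfDict primary_key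
  exact pv_main listOfDict primary_key hpre
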